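-- pv_equiv track=rewrite | github.com/michaelbironneau/rotary | main.py | get_mvsa_hour_constraints
-- ===== SOURCE A (Python) =====
-- def ix(museum_ix, mvsas_ix, day_ix, p_len, d_len):
--     """Return the index of the variable list represented by the composite indexes"""
--     return day_ix + (d_len)*(mvsas_ix + (p_len)*(museum_ix))
--
-- def get_mvsa_hour_constraints(museums, mvsas, days):
--     """MVSA must work at least this many days"""
--     constraints = []
--     constraint_b = []
--     for mvsa_ix, p in enumerate(mvsas):
--         constraints.append([0]*len(mvsas)*len(museums)*len(days))
--         constraint_b.append(-1*p["days_per_week_pref"])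
--         for museum_ix, _ in enumerate(museums):
--             for day_ix, _ in enumerate(days):
--                 constraints[len(constraints)-1][ix(museum_ix, mvsa_ix, day_ix, len(mvsas), len(days))] = -1
--     return (constraints, constraint_b)
-- ===== SOURCE B (Python) =====
-- def get_mvsa_hour_constraints(museums, mvsas, days):
--     """MVSA must work at least this many days"""
--     P, M, D = len(mvsas), len(museums), len(days)
--     constraints = [([0] * (D * i) + [-1] * D + [0] * (D * (P - 1 - i))) * M
--                    for i in range(P)]
--     constraint_b = [-p["days_per_week_pref"] for p in mvsas]
--     return (constraints, constraint_b)
-- ===== Notes on version B (the rewrite author's own statement) =====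
-- stated objective: alternative
-- what changed: B constructs each constraint row in closed form as block concatenation plus list replication -- ([0]*(D*i) + [-1]*D + [0]*(D*(P-1-i))) * M -- with no per-cell loop, no ix index arithmetic and no scatter into a preallocated zero row; the b-vector is a plain comprehension over mvsas.
import Mathlib
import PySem

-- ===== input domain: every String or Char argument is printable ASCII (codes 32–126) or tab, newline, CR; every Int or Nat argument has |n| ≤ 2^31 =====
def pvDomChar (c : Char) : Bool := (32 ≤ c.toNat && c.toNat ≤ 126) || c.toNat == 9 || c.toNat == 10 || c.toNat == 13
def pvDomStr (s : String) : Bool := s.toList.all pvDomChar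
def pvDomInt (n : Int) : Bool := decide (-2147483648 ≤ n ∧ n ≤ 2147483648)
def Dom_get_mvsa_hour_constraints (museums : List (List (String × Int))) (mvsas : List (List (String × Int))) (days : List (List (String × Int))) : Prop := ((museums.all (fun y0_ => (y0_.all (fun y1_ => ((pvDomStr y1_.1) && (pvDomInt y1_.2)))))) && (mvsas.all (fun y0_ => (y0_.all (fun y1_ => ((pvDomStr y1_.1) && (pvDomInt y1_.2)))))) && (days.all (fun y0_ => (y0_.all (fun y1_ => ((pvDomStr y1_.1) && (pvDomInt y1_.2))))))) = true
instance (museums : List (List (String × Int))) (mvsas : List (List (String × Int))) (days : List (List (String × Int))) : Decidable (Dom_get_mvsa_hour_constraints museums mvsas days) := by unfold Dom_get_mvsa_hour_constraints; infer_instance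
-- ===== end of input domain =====

-- B builds each constraint row in closed form as block concatenation plus list replication
-- (([0]*(D*i) + [-1]*D + [0]*(D*(P-1-i))) * M) instead of A's allocate-zeros-then-scatter
-- via the ix index helper; same asymptotic cost, different construction.

-- ===== PORT A =====
-- dict[str,int] is an association list; Python's p[k] is the first match (KeyError excluded by Pre_)
def pvLookup (p : List (String × Int)) (k : String) : Option Int :=
  (p.find? (fun kv => kv.1 == k)).map (·.2)

def pvIx (museum_ix mvsas_ix day_ix p_len d_len : Int) : Int :=
  day_ix + d_len * (mvsas_ix + p_len * museum_ix)

-- Python mutates the row it has just appended (constraints[len(constraints)-1][…] = -1);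
-- ported by building that row with the same nested loops and the same writes, then appending it.
def get_mvsa_hour_constraints (museums : List (List (String × Int))) (mvsas : List (List (String × Int))) (days : List (List (String × Int))) : List (List Int) × List Int :=
  (PySem.List.enumerate mvsas).foldl
    (fun acc ip =>
      let row0 : List Int := List.replicate (mvsas.length * museums.length * days.length) (0 : Int)
      let row := (PySem.List.enumerate museums).foldl
        (fun r mp => (PySem.List.enumerate days).foldl
          (fun r' dp => PySem.List.pySetD r' (pvIx mp.1 ip.1 dp.1 (mvsas.length : Int) (days.length : Int)) (-1)) r) row0
      (acc.1 ++ [row], acc.2 ++ [-1 * (pvLookup ip.2 "days_per_week_pref").getD 0]))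
    ([], [])

-- ===== PORT B =====
-- range(len(…)) is ported as List.range; Python's 'xs * M' list replication is
-- (List.replicate M xs).flatten; '[c] * n' is List.replicate n c (all exact: counts are Nat here)
def get_mvsa_hour_constraints_alt (museums : List (List (String × Int))) (mvsas : List (List (String × Int))) (days : List (List (String × Int))) : List (List Int) × List Int :=
  ((List.range mvsas.length).map (fun i =>
      (List.replicate museums.length
        (List.replicate (days.length * i) (0 : Int)
          ++ List.replicate days.length (-1)
          ++ List.replicate (days.length * (mvsas.length - 1 - i)) 0)).flatten),
   mvsas.map (fun p => -((pvLookup p "days_per_week_pref").getD 0)))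

-- ===== PRECONDITION & SPEC =====
-- Pre_ excludes exactly the inputs on which some mvsa lacks the key "days_per_week_pref":
-- there Python A raises KeyError (and Python B raises KeyError too).
def Pre_get_mvsa_hour_constraints (museums : List (List (String × Int))) (mvsas : List (List (String × Int))) (days : List (List (String × Int))) : Prop :=
  (mvsas.all (fun p => p.any (fun kv => kv.1 == "days_per_week_pref"))) = true
instance (museums : List (List (String × Int))) (mvsas : List (List (String × Int))) (days : List (List (String × Int))) : Decidable (Pre_get_mvsa_hour_constraints museums mvsas days) := by unfold Pre_get_mvsa_hour_constraints; infer_instance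

def pvWitness_get_mvsa_hour_constraints : (List (List (String × Int))) × (List (List (String × Int))) × (List (List (String × Int))) :=
  ([[("name", 1)]], [[("days_per_week_pref", 2)], [("days_per_week_pref", 3)]], [[("day", 0)]])

def Spec_get_mvsa_hour_constraints (museums : List (List (String × Int))) (mvsas : List (List (String × Int))) (days : List (List (String × Int))) (out : List (List Int) × List Int) : Prop := out = get_mvsa_hour_constraints_alt museums mvsas days
instance (museums : List (List (String × Int))) (mvsas : List (List (String × Int))) (days : List (List (String × Int))) (out : List (List Int) × List Int) : Decidable (Spec_get_mvsa_hour_constraints museums mvsas days out) := by unfold Spec_get_mvsa_hour_constraints; infer_instance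

-- ===== CLAIM (what is proved, stated in full; the proofs are below) =====
def Claim_equal_get_mvsa_hour_constraints : Prop := ∀ (museums : List (List (String × Int))) (mvsas : List (List (String × Int))) (days : List (List (String × Int))), Dom_get_mvsa_hour_constraints museums mvsas days → Pre_get_mvsa_hour_constraints museums mvsas days → Spec_get_mvsa_hour_constraints museums mvsas days (get_mvsa_hour_constraints museums mvsas days)

-- ===== LEMMAS AND PROOFS =====

-- writing -1 at offsets l1.length, l1.length+1, …, l1.length+D-1 overwrites the middle segment
theorem pvFoldSet : ∀ (D : Nat) (l1 a l2 : List Int), a.length = D →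
    (List.range D).foldl (fun r k => r.set (k + l1.length) (-1)) (l1 ++ a ++ l2)
      = l1 ++ List.replicate D (-1) ++ l2 := by
  intro D
  induction D with
  | zero => intro l1 a l2 ha; simp [List.length_eq_zero_iff.mp ha]
  | succ D ih =>
    intro l1 a l2 ha
    rcases a.eq_nil_or_concat with rfl | ⟨b, x, rfl⟩
    · simp at ha
    · have hb : b.length = D := by simpa using ha
      rw [List.range_succ, List.foldl_append]
      have h2 : l1 ++ b.concat x ++ l2 = l1 ++ b ++ ([x] ++ l2) := by simp
      rw [h2, ih l1 b ([x] ++ l2) hb]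
      have h3 : l1 ++ List.replicate D (-1 : Int) ++ ([x] ++ l2)
          = (l1 ++ List.replicate D (-1)) ++ (x :: l2) := by simp
      simp only [List.foldl_cons, List.foldl_nil, h3]
      rw [List.set_append_right _ _ (by simp [Nat.add_comm])]
      have : D + l1.length - (l1 ++ List.replicate D (-1 : Int)).length = 0 := by simp [Nat.add_comm]
      rw [this]
      simp [List.replicate_succ']

-- a fold over enumerate that only uses the index is a fold over range
theorem pvEnumFold {α β : Type} (g : β → Int → β) : ∀ (xs : List α) (s : Int) (init : β),
    (PySem.List.enumerate xs s).foldl (fun r p => g r p.1) init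
      = (List.range xs.length).foldl (fun r (k : Nat) => g r (s + (k : Int))) init := by
  intro xs
  induction xs with
  | nil => intro s init; simp [PySem.List.enumerate_nil]
  | cons x xs ih =>
    intro s init
    rw [PySem.List.enumerate_cons, List.foldl_cons, ih, List.length_cons,
        List.range_succ_eq_map, List.foldl_cons, List.foldl_map]
    have hf : (fun (r : β) (k : Nat) => g r (s + 1 + (k : Int)))
        = fun (r : β) (k : Nat) => g r (s + (k.succ : Int)) := by
      funext r k; congr 1; push_cast; ring
    simp only [Nat.cast_zero, add_zero, hf]

-- A's outer loop writes the block of museum m at offset D*(i + P*m), block by block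
theorem pvOuter (D P i : Nat) (hi : i < P) : ∀ (M : Nat) (l2 : List Int),
    (List.range M).foldl
        (fun r m => (List.range D).foldl (fun r' k => r'.set (k + D * (i + P * m)) (-1)) r)
        (List.replicate (M * (P * D)) 0 ++ l2)
      = (List.replicate M (List.replicate (D * i) (0 : Int) ++ List.replicate D (-1)
          ++ List.replicate (D * (P - 1 - i)) 0)).flatten ++ l2 := by
  intro M
  induction M with
  | zero => intro l2; simp
  | succ M ih =>
    intro l2
    rw [List.range_succ, List.foldl_append]
    have hrep : List.replicate ((M + 1) * (P * D)) (0 : Int)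
        = List.replicate (M * (P * D)) 0 ++ List.replicate (P * D) 0 := by
      rw [← List.replicate_add]; congr 1; ring
    rw [hrep, List.append_assoc, ih (List.replicate (P * D) 0 ++ l2)]
    simp only [List.foldl_cons, List.foldl_nil]
    have hsplit : List.replicate (P * D) (0 : Int)
        = List.replicate (D * i) 0 ++ (List.replicate D 0 ++ List.replicate (D * (P - 1 - i)) 0) := by
      rw [← List.replicate_add, ← List.replicate_add]; congr 1
      have hP : P = i + 1 + (P - 1 - i) := by omega
      calc P * D = D * (i + 1 + (P - 1 - i)) := by rw [← hP]; ring
        _ = D * i + (D + D * (P - 1 - i)) := by ring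
    set blk : List Int := List.replicate (D * i) (0 : Int) ++ List.replicate D (-1)
          ++ List.replicate (D * (P - 1 - i)) 0 with hblk
    have hblklen : blk.length = P * D := by
      simp [hblk]
      have hP : P = i + 1 + (P - 1 - i) := by omega
      calc D * i + (D + D * (P - 1 - i)) = D * (i + 1 + (P - 1 - i)) := by ring
        _ = P * D := by rw [← hP]; ring
    have hl1 : ((List.replicate M blk).flatten ++ List.replicate (D * i) (0 : Int)).length
        = D * (i + P * M) := by
      simp [List.length_flatten, hblklen]
      ring
    have harr : (List.replicate M blk).flatten ++ (List.replicate (P * D) (0 : Int) ++ l2)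
        = ((List.replicate M blk).flatten ++ List.replicate (D * i) 0)
          ++ List.replicate D 0 ++ (List.replicate (D * (P - 1 - i)) 0 ++ l2) := by
      rw [hsplit]; simp only [List.append_assoc]
    rw [harr, ← hl1]
    rw [pvFoldSet D _ (List.replicate D 0) _ (by simp)]
    rw [List.replicate_succ', List.flatten_append]
    simp [hblk, List.append_assoc]

-- the row A builds for mvsa index iv, and the row B builds for mvsa index i
def pvRowA (museums days : List (List (String × Int))) (P : Nat) (iv : Int) : List Int :=
  (PySem.List.enumerate museums).foldl
    (fun r mp => (PySem.List.enumerate days).foldl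
      (fun r' dp => PySem.List.pySetD r' (pvIx mp.1 iv dp.1 (P : Int) (days.length : Int)) (-1)) r)
    (List.replicate (P * museums.length * days.length) (0 : Int))

def pvRowB (museums days : List (List (String × Int))) (P : Nat) (i : Nat) : List Int :=
  (List.replicate museums.length
    (List.replicate (days.length * i) (0 : Int)
      ++ List.replicate days.length (-1)
      ++ List.replicate (days.length * (P - 1 - i)) 0)).flatten

theorem pvRowEq (museums days : List (List (String × Int))) (P i : Nat) (hi : i < P) :
    pvRowA museums days P (i : Int) = pvRowB museums days P i := by
  unfold pvRowA pvRowB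
  rw [pvEnumFold (fun r m => (PySem.List.enumerate days).foldl
      (fun r' dp => PySem.List.pySetD r' (pvIx m (i : Int) dp.1 (P : Int) (days.length : Int)) (-1)) r)]
  have h2 : (fun (r : List Int) (k : Nat) => (PySem.List.enumerate days).foldl
        (fun r' dp => PySem.List.pySetD r' (pvIx ((0 : Int) + (k : Int)) (i : Int) dp.1 (P : Int) (days.length : Int)) (-1)) r)
      = fun r m => (List.range days.length).foldl
          (fun r' k => r'.set (k + days.length * (i + P * m)) (-1)) r := by
    funext r m
    rw [pvEnumFold (fun r' d => PySem.List.pySetD r' (pvIx ((0 : Int) + (m : Int)) (i : Int) d (P : Int) (days.length : Int)) (-1))]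
    congr 1
    funext r' k
    have hidx : pvIx ((0 : Int) + (m : Int)) (i : Int) ((0 : Int) + (k : Int)) (P : Int) (days.length : Int)
        = ((k + days.length * (i + P * m) : Nat) : Int) := by
      unfold pvIx; push_cast; ring
    rw [hidx, PySem.List.pySetD_natCast]
  rw [h2]
  have h3 : List.replicate (P * museums.length * days.length) (0 : Int)
      = List.replicate (museums.length * (P * days.length)) 0 ++ [] := by
    rw [List.append_nil]; congr 1; ring
  rw [h3, pvOuter days.length P i hi museums.length []]
  rw [List.append_nil]

-- A's top-level loop appends one row and one b-entry per mvsa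
theorem pvFoldTop (museums days : List (List (String × Int))) (P : Nat) :
    ∀ (l : List (List (String × Int))) (s : Int) (c1 : List (List Int)) (c2 : List Int),
    (PySem.List.enumerate l s).foldl
      (fun acc ip => (acc.1 ++ [pvRowA museums days P ip.1],
                      acc.2 ++ [-1 * (pvLookup ip.2 "days_per_week_pref").getD 0]))
      (c1, c2)
    = (c1 ++ (PySem.List.enumerate l s).map (fun ip => pvRowA museums days P ip.1),
       c2 ++ l.map (fun p => -1 * (pvLookup p "days_per_week_pref").getD 0)) := by
  intro l
  induction l with
  | nil => intro s c1 c2; simp [PySem.List.enumerate_nil]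
  | cons x xs ih =>
    intro s c1 c2
    rw [PySem.List.enumerate_cons, List.foldl_cons, ih]
    simp [List.append_assoc]

theorem pvMain (museums mvsas days : List (List (String × Int))) :
    get_mvsa_hour_constraints museums mvsas days = get_mvsa_hour_constraints_alt museums mvsas days := by
  have hA : get_mvsa_hour_constraints museums mvsas days
      = ((PySem.List.enumerate mvsas (0 : Int)).map (fun ip => pvRowA museums days mvsas.length ip.1),
         mvsas.map (fun p => -1 * (pvLookup p "days_per_week_pref").getD 0)) := by
    unfold get_mvsa_hour_constraints
    exact (pvFoldTop museums days mvsas.length mvsas 0 [] []).trans (by simp)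
  have hB : get_mvsa_hour_constraints_alt museums mvsas days
      = ((List.range mvsas.length).map (fun i => pvRowB museums days mvsas.length i),
         mvsas.map (fun p => -((pvLookup p "days_per_week_pref").getD 0))) := rfl
  rw [hA, hB]
  refine Prod.ext ?_ ?_
  · apply List.ext_getElem
    · simp [PySem.List.length_enumerate]
    · intro k h1 h2
      have hk : k < mvsas.length := by simpa [PySem.List.length_enumerate] using h1
      simp only [List.getElem_map, PySem.List.getElem_enumerate, List.getElem_range]
      rw [show ((0 : Int) + (k : Int)) = (k : Int) from by ring]
      exact pvRowEq museums days mvsas.length k hk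
  · apply List.map_congr_left
    intro p _
    ring

-- ===== VERDICT (by name: the statement is the Claim_ definition above) =====
theorem get_mvsa_hour_constraints_spec : Claim_equal_get_mvsa_hour_constraints := by
  intro museums mvsas days _ _
  unfold Spec_get_mvsa_hour_constraints
  exact pvMain museums mvsas days
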